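-- pv_equiv track=rewrite | github.com/a2458918054-ai/Research-on-Intelligent-Agents-for-Academic-Literature-Retrieval | scripts/data_process.py | extract_intro_conclusion
-- ===== SOURCE A (Python) =====
-- def extract_intro_conclusion(sections):
--     intro_paras = []
--     conclusion_paras = []
--
--     # sections 是字典！
--     if not isinstance(sections, dict):
--         return intro_paras, conclusion_paras
--
--     for title, content in sections.items():
--         lower_title = title.lower()
--
--         # 提取 Introduction
--         if "introduction" in lower_title:
--             if isinstance(content, dict) and "paragraphs" in content:
--                 paras = content["paragraphs"]
--                 if isinstance(paras, list):
--                     intro_paras = [p.strip() for p in paras if isinstance(p, str) and p.strip()]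
--
--         # 提取 Conclusion
--         if "conclusion" in lower_title:
--             if isinstance(content, dict) and "paragraphs" in content:
--                 paras = content["paragraphs"]
--                 if isinstance(paras, list):
--                     conclusion_paras = [p.strip() for p in paras if isinstance(p, str) and p.strip()]
--
--     return intro_paras, conclusion_paras
-- ===== SOURCE B (Python) =====
-- def _extract_paras(sections, keyword):
--     # scan from the end: the last qualifying section wins, so the first hit
--     # in reverse order is the answer
--     for title, content in reversed(list(sections.items())):
--         if keyword in title.lower() and isinstance(content, dict):
--             paras = content.get("paragraphs")
--             if isinstance(paras, list):
--                 return [p.strip() for p in paras if isinstance(p, str) and p.strip()]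
--     return []
--
--
-- def extract_intro_conclusion(sections):
--     if not isinstance(sections, dict):
--         return [], []
--     return _extract_paras(sections, "introduction"), _extract_paras(sections, "conclusion")
-- ===== Notes on version B (the rewrite author's own statement) =====
-- stated objective: simpler
-- what changed: Replaces the single combined loop with mutable overwrite accumulators by a keyword-scoped helper that scans the sections in reverse and returns at the first qualifying match (last-match-wins becomes first-hit-on-reversed with early return), called once per keyword.
import Mathlib
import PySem

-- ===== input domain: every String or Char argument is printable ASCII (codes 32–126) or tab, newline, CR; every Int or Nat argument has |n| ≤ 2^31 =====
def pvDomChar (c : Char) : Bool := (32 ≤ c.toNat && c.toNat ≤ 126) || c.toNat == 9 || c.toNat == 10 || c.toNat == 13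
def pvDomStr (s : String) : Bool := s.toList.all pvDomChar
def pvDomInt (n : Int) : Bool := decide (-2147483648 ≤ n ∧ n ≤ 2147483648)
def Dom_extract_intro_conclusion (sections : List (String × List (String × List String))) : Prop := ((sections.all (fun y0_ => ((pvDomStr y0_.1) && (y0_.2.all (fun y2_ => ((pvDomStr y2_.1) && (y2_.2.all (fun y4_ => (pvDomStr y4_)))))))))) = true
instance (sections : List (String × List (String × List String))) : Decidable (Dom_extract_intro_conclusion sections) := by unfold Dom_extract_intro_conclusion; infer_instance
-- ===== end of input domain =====

-- B replaces A's single combined loop with overwrite accumulators by a keyword-scoped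
-- helper that scans the sections in reverse and returns at the first qualifying match
-- (objective: simpler decomposition; same O(n) cost).


-- ===== PORT A =====
-- [p.strip() for p in paras if isinstance(p, str) and p.strip()]
-- (isinstance(p, str) is always true under the typed domain)
def pvClean (paras : List String) : List String :=
  (paras.filter (fun p => PySem.Str.strip p ≠ "")).map PySem.Str.strip

def extract_intro_conclusion (sections : List (String × List (String × List String))) : List String × List String :=
  -- the isinstance(sections, dict) guard is always true under the typed domain
  sections.foldl
    (fun acc tc =>
      let lower_title := PySem.Str.lower tc.1
      let acc :=
        if PySem.Str.isIn "introduction" lower_title then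
          -- "paragraphs" in content, then content["paragraphs"]
          match PySem.Dict.get? (PySem.Dict.mk tc.2) "paragraphs" with
          | some paras => (pvClean paras, acc.2)
          | none => acc
        else acc
      if PySem.Str.isIn "conclusion" lower_title then
        match PySem.Dict.get? (PySem.Dict.mk tc.2) "paragraphs" with
        | some paras => (acc.1, pvClean paras)
        | none => acc
      else acc)
    ([], [])

-- ===== PORT B =====
-- first qualifying section in reverse order wins; early return
def pvExtractParas (secs : List (String × List (String × List String))) (keyword : String) : List String :=
  match secs with
  | [] => []
  | (title, content) :: rest =>
    if PySem.Str.isIn keyword (PySem.Str.lower title) then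
      match PySem.Dict.get? (PySem.Dict.mk content) "paragraphs" with
      | some paras => (paras.filter (fun p => PySem.Str.strip p ≠ "")).map PySem.Str.strip
      | none => pvExtractParas rest keyword
    else pvExtractParas rest keyword

def extract_intro_conclusion_alt (sections : List (String × List (String × List String))) : List String × List String :=
  (pvExtractParas sections.reverse "introduction", pvExtractParas sections.reverse "conclusion")

-- ===== PRECONDITION & SPEC =====
def Spec_extract_intro_conclusion (sections : List (String × List (String × List String))) (out : List String × List String) : Prop := out = extract_intro_conclusion_alt sections
instance (sections : List (String × List (String × List String))) (out : List String × List String) : Decidable (Spec_extract_intro_conclusion sections out) := by unfold Spec_extract_intro_conclusion; infer_instance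

-- ===== CLAIM (what is proved, stated in full; the proofs are below) =====
def Claim_equal_extract_intro_conclusion : Prop := ∀ (sections : List (String × List (String × List String))), Dom_extract_intro_conclusion sections → Spec_extract_intro_conclusion sections (extract_intro_conclusion sections)

-- ===== LEMMAS AND PROOFS =====

-- proof-side helper: pvExtractParas with an explicit default for the no-match case
def pvEP (secs : List (String × List (String × List String))) (keyword : String) (d : List String) : List String :=
  match secs with
  | [] => d
  | (title, content) :: rest =>
    if PySem.Str.isIn keyword (PySem.Str.lower title) then
      match PySem.Dict.get? (PySem.Dict.mk content) "paragraphs" with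
      | some paras => pvClean paras
      | none => pvEP rest keyword d
    else pvEP rest keyword d

theorem pvEP_eq_extract (secs : List (String × List (String × List String))) (kw : String) :
    pvEP secs kw [] = pvExtractParas secs kw := by
  induction secs with
  | nil => rfl
  | cons h t ih =>
    obtain ⟨title, content⟩ := h
    simp only [pvEP, pvExtractParas, pvClean, ih]

theorem pvEP_append (m n : List (String × List (String × List String))) (kw : String) (d : List String) :
    pvEP (m ++ n) kw d = pvEP m kw (pvEP n kw d) := by
  induction m with
  | nil => rfl
  | cons h t ih =>
    obtain ⟨title, content⟩ := h
    simp only [List.cons_append, pvEP, ih]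

theorem foldA_eq (l : List (String × List (String × List String))) (a b : List String) :
    l.foldl
      (fun acc tc =>
        let lower_title := PySem.Str.lower tc.1
        let acc :=
          if PySem.Str.isIn "introduction" lower_title then
            match PySem.Dict.get? (PySem.Dict.mk tc.2) "paragraphs" with
            | some paras => (pvClean paras, acc.2)
            | none => acc
          else acc
        if PySem.Str.isIn "conclusion" lower_title then
          match PySem.Dict.get? (PySem.Dict.mk tc.2) "paragraphs" with
          | some paras => (acc.1, pvClean paras)
          | none => acc
        else acc)
      (a, b)
    = (pvEP l.reverse "introduction" a, pvEP l.reverse "conclusion" b) := by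
  induction l generalizing a b with
  | nil => rfl
  | cons h t ih =>
    obtain ⟨title, content⟩ := h
    simp only [List.foldl_cons, List.reverse_cons, pvEP_append]
    rw [ih]
    simp only [pvEP]
    by_cases hi : PySem.Str.isIn "introduction" (PySem.Str.lower title) = true <;>
      by_cases hc : PySem.Str.isIn "conclusion" (PySem.Str.lower title) = true <;>
        simp only [hi, hc, if_false, Bool.false_eq_true, if_pos] <;>
          cases PySem.Dict.get? (PySem.Dict.mk content) "paragraphs" <;> simp

-- ===== VERDICT (by name: the statement is the Claim_ definition above) =====
theorem extract_intro_conclusion_spec : Claim_equal_extract_intro_conclusion := by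
  intro sections _
  show _ = _
  rw [extract_intro_conclusion, extract_intro_conclusion_alt, foldA_eq,
    pvEP_eq_extract, pvEP_eq_extract]
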